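-- pv_equiv track=rewrite | github.com/BurningMarshmallow/rosalind | workspace/ba10e.py | get_alignment_states
-- ===== SOURCE A (Python) =====
-- def get_alignment_states(alignment_strings, threshold_columns):
--     m = len(alignment_strings)
--     states = [[] for t in range(m)]
--     for i in range(m):
--         cur_idx = 0
--         for j in range(len(alignment_strings[i])):
--             if j in threshold_columns:
--                 if alignment_strings[i][j] == "-":
--                     continue
--                 states[i].append("I" + str(cur_idx))
--                 continue
--             cur_idx += 1
--             if alignment_strings[i][j] == "-":
--                 states[i].append("D" + str(cur_idx))
--             else:
--                 states[i].append("M" + str(cur_idx))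
--     return states
-- ===== SOURCE B (Python) =====
-- def get_alignment_states(alignment_strings, threshold_columns):
--     # Column-major: walk the columns once; for each column compute its label(s) once
--     # and append to every row's accumulator, instead of per-row recomputation.
--     thresholds = set(threshold_columns)
--     rows = [[] for _ in alignment_strings]
--     maxlen = max(map(len, alignment_strings), default=0)
--     idx = 0
--     for j in range(maxlen):
--         if j in thresholds:
--             label = "I" + str(idx)
--             for s, row in zip(alignment_strings, rows):
--                 if j < len(s) and s[j] != "-":
--                     row.append(label)
--         else:
--             idx += 1
--             mlab = "M" + str(idx)
--             dlab = "D" + str(idx)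
--             for s, row in zip(alignment_strings, rows):
--                 if j < len(s):
--                     row.append(dlab if s[j] == "-" else mlab)
--     return rows
-- ===== Notes on version B (the rewrite author's own statement) =====
-- stated objective: faster
-- what changed: B traverses the alignment column-major: one pass over the columns, classifying each column once against a set of the threshold indices, building each column's label string(s) once, and appending to all m row accumulators, instead of A's row-major per-row re-derivation of cur_idx with an O(|T|) list-membership scan and a fresh label string for every cell.
import Mathlib
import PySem

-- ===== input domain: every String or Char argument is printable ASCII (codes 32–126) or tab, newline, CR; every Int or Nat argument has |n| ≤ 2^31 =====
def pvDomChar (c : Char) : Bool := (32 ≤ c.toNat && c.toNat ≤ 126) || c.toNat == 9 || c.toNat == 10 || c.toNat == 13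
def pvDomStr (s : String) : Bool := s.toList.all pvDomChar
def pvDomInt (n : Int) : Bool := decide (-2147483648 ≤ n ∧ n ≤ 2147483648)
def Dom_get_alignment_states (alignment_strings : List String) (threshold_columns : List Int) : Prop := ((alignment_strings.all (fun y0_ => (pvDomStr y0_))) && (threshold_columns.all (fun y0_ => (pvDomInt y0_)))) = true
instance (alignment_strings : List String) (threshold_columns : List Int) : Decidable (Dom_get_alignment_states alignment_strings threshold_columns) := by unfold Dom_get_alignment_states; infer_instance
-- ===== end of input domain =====

-- B walks the alignment column-major (one pass over the columns, each column classified once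
-- against a set and its labels built once, appended to all row accumulators) instead of A's
-- row-major per-cell recomputation (objective: faster; measured).

-- ===== PORT A =====
-- Inner loop of A over j in range(len(alignment_strings[i])); state = (cur_idx, states[i]).
-- alignment_strings[i][j]: j < length always, so getD's default is never reached.
def pvARow (cs : List Char) (tc : List Int) : List String :=
  ((List.range cs.length).foldl (fun (st : Int × List String) (j : Nat) =>
      let curIdx := st.1
      let acc := st.2
      if ((j : Int) ∈ tc) then
        if cs.getD j ' ' = '-' then (curIdx, acc)
        else (curIdx, acc ++ ["I" ++ PySem.Int.toStr curIdx])
      else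
        let curIdx := curIdx + 1
        if cs.getD j ' ' = '-' then (curIdx, acc ++ ["D" ++ PySem.Int.toStr curIdx])
        else (curIdx, acc ++ ["M" ++ PySem.Int.toStr curIdx])) (0, [])).2

def get_alignment_states (alignment_strings : List String) (threshold_columns : List Int) : List (List String) :=
  let m := alignment_strings.length
  let states := List.replicate m ([] : List String)
  (List.range m).foldl (fun states i =>
      states.set i (pvARow (alignment_strings.getD i "").toList threshold_columns)) states

-- ===== PORT B =====
-- Column-major: state = (idx, the m row accumulators); zip(alignment_strings, rows) ported
-- as a map over List.zip; s[j] guarded by j < len(s) so getD's default is never reached.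
def pvBStep (alignment_strings : List String) (thresholds : PySem.Set Int)
    (st : Int × List (List String)) (j : Nat) : Int × List (List String) :=
  let idx := st.1
  let rows := st.2
  if (j : Int) ∈ thresholds then
    let label := "I" ++ PySem.Int.toStr idx
    (idx, (alignment_strings.zip rows).map (fun p =>
        if j < p.1.toList.length ∧ p.1.toList.getD j ' ' ≠ '-' then p.2 ++ [label] else p.2))
  else
    let idx := idx + 1
    let mlab := "M" ++ PySem.Int.toStr idx
    let dlab := "D" ++ PySem.Int.toStr idx
    (idx, (alignment_strings.zip rows).map (fun p =>
        if j < p.1.toList.length then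
          p.2 ++ [if p.1.toList.getD j ' ' = '-' then dlab else mlab]
        else p.2))

def get_alignment_states_alt (alignment_strings : List String) (threshold_columns : List Int) : List (List String) :=
  let thresholds := PySem.Set.ofList threshold_columns
  let rows := alignment_strings.map (fun _ => ([] : List String))
  let maxlen := alignment_strings.foldl (fun m s => max m s.toList.length) 0
  ((List.range maxlen).foldl (pvBStep alignment_strings thresholds) (0, rows)).2

-- ===== PRECONDITION & SPEC =====
def Spec_get_alignment_states (alignment_strings : List String) (threshold_columns : List Int) (out : List (List String)) : Prop := out = get_alignment_states_alt alignment_strings threshold_columns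
instance (alignment_strings : List String) (threshold_columns : List Int) (out : List (List String)) : Decidable (Spec_get_alignment_states alignment_strings threshold_columns out) := by unfold Spec_get_alignment_states; infer_instance

-- ===== CLAIM (what is proved, stated in full; the proofs are below) =====
def Claim_equal_get_alignment_states : Prop := ∀ (alignment_strings : List String) (threshold_columns : List Int), Dom_get_alignment_states alignment_strings threshold_columns → Spec_get_alignment_states alignment_strings threshold_columns (get_alignment_states alignment_strings threshold_columns)

-- ===== LEMMAS AND PROOFS =====

-- common reference semantics of one row: scan chars with their column index j and running idx
def pvRowSpec (tc : List Int) : List Char → Nat → Int → List String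
  | [], _, _ => []
  | c :: rest, j, idx =>
    if (j : Int) ∈ tc then
      (if c = '-' then [] else ["I" ++ PySem.Int.toStr idx]) ++ pvRowSpec tc rest (j + 1) idx
    else
      (if c = '-' then ["D" ++ PySem.Int.toStr (idx + 1)] else ["M" ++ PySem.Int.toStr (idx + 1)])
        ++ pvRowSpec tc rest (j + 1) (idx + 1)

lemma pvARow_fold (tc : List Int) (full : List Char) :
    ∀ (cs : List Char) (j0 : Nat) (idx : Int) (acc : List String), full.drop j0 = cs →
    ((List.range' j0 cs.length).foldl (fun (st : Int × List String) (j : Nat) =>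
      let curIdx := st.1
      let acc := st.2
      if ((j : Int) ∈ tc) then
        if full.getD j ' ' = '-' then (curIdx, acc)
        else (curIdx, acc ++ ["I" ++ PySem.Int.toStr curIdx])
      else
        let curIdx := curIdx + 1
        if full.getD j ' ' = '-' then (curIdx, acc ++ ["D" ++ PySem.Int.toStr curIdx])
        else (curIdx, acc ++ ["M" ++ PySem.Int.toStr curIdx])) (idx, acc)).2
      = acc ++ pvRowSpec tc cs j0 idx := by
  intro cs
  induction cs with
  | nil => intro j0 idx acc h; simp [pvRowSpec]
  | cons c rest ih =>
    intro j0 idx acc h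
    have hj0 : j0 < full.length := by
      by_contra hlt
      have hnil : full.drop j0 = [] := List.drop_eq_nil_of_le (by omega)
      rw [hnil] at h; simp at h
    have h0 : (full.drop j0)[0]? = some c := by rw [h]; rfl
    have hsome : full[j0]? = some c := by
      rw [List.getElem?_drop] at h0; simpa using h0
    have hget : full.getD j0 ' ' = c := by
      simp [List.getD, hsome]
    have hdrop : full.drop (j0 + 1) = rest := by
      have := congrArg (List.drop 1) h
      simpa [List.drop_drop] using this
    rw [List.length_cons, List.range'_succ, List.foldl_cons]
    simp only [hget]
    by_cases htc : (j0 : Int) ∈ tc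
    · by_cases hc : c = '-'
      · simp only [htc, hc, if_true]
        rw [ih (j0 + 1) idx acc hdrop]
        simp [pvRowSpec, htc]
      · simp only [htc, hc, if_true, if_false]
        rw [ih (j0 + 1) idx (acc ++ ["I" ++ PySem.Int.toStr idx]) hdrop]
        simp [pvRowSpec, htc, hc]
    · by_cases hc : c = '-'
      · simp only [htc, hc, if_true, if_false]
        rw [ih (j0 + 1) (idx + 1) (acc ++ ["D" ++ PySem.Int.toStr (idx + 1)]) hdrop]
        simp [pvRowSpec, htc]
      · simp only [htc, hc, if_false]
        rw [ih (j0 + 1) (idx + 1) (acc ++ ["M" ++ PySem.Int.toStr (idx + 1)]) hdrop]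
        simp [pvRowSpec, htc, hc]

lemma pvARow_eq_spec (cs : List Char) (tc : List Int) :
    pvARow cs tc = pvRowSpec tc cs 0 0 := by
  have := pvARow_fold tc cs cs 0 0 [] (by simp)
  simpa [pvARow, List.range_eq_range'] using this

lemma pvFoldl_max_init (l : List String) : ∀ a : Nat,
    a ≤ l.foldl (fun m t => max m t.toList.length) a := by
  induction l with
  | nil => intro a; simp
  | cons x xs ih =>
    intro a
    calc a ≤ max a x.toList.length := le_max_left _ _
      _ ≤ _ := ih _

-- every row is no longer than the foldl-max length
lemma pvMaxlen_le (s : String) : ∀ (l : List String) (a : Nat), s ∈ l →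
    s.toList.length ≤ l.foldl (fun m t => max m t.toList.length) a := by
  intro l
  induction l with
  | nil => intro a h; cases h
  | cons x xs ih =>
    intro a h
    rcases List.mem_cons.1 h with h | h
    · subst h
      simp only [List.foldl_cons]
      calc s.toList.length ≤ max a s.toList.length := le_max_right _ _
        _ ≤ _ := pvFoldl_max_init _ _
    · exact ih _ h

-- the outer A loop: set at indices j0, j0+1, … over a list completed up to j0
lemma pvFold_set (g : Nat → List String) :
    ∀ (tail : List (List String)) (j0 : Nat) (done : List (List String)), done.length = j0 →
    (List.range' j0 tail.length).foldl (fun s i => s.set i (g i)) (done ++ tail)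
      = done ++ (List.range' j0 tail.length).map g := by
  intro tail
  induction tail with
  | nil => intro j0 done h; simp
  | cons t ts ih =>
    intro j0 done h
    rw [List.length_cons, List.range'_succ, List.foldl_cons, List.map_cons]
    have hset : (done ++ t :: ts).set j0 (g j0) = (done ++ [g j0]) ++ ts := by
      rw [← h]
      rw [List.set_append_right _ _ (le_refl _)]
      simp
    rw [hset, ih (j0 + 1) (done ++ [g j0]) (by simp [h])]
    simp

lemma pvA_map (alignment_strings : List String) (tc : List Int) :
    get_alignment_states alignment_strings tc
      = (List.range alignment_strings.length).map
          (fun i => pvARow (alignment_strings.getD i "").toList tc) := by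
  unfold get_alignment_states
  have := pvFold_set
    (fun i => pvARow (alignment_strings.getD i "").toList tc)
    (List.replicate alignment_strings.length ([] : List String)) 0 [] rfl
  simpa [List.range_eq_range'] using this

lemma pvMap_getD (l : List String) (f : String → List String) :
    l.map f = (List.range l.length).map (fun i => f (l.getD i "")) := by
  apply List.ext_getElem
  · simp
  · intro i h1 h2
    simp only [List.getElem_map, List.getElem_range]
    have hi : i < l.length := by simpa using h1
    rw [List.getD_eq_getElem l "" hi]

-- zipWith plumbing for the column-major loop
lemma pvZipWith_comp {α β γ δ : Type} (f : α → γ → δ) (g : α → β → γ) :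
    ∀ (l1 : List α) (l2 : List β),
    List.zipWith f l1 (List.zipWith g l1 l2) = List.zipWith (fun a b => f a (g a b)) l1 l2 := by
  intro l1
  induction l1 with
  | nil => intro l2; simp
  | cons x xs ih =>
    intro l2
    cases l2 with
    | nil => simp
    | cons y ys => simp [ih]

lemma pvZipWith_congr {α β γ : Type} (f g : α → β → γ) :
    ∀ (l1 : List α) (l2 : List β), (∀ a ∈ l1, ∀ b, f a b = g a b) →
    List.zipWith f l1 l2 = List.zipWith g l1 l2 := by
  intro l1
  induction l1 with
  | nil => intro l2 _; simp
  | cons x xs ih =>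
    intro l2 h
    cases l2 with
    | nil => simp
    | cons y ys =>
      simp only [List.zipWith_cons_cons]
      rw [h x (List.mem_cons_self) y, ih ys (fun a ha b => h a (List.mem_cons_of_mem _ ha) b)]

lemma pvZipWith_id {α β : Type} (f : α → β → β) :
    ∀ (l1 : List α) (l2 : List β), l2.length = l1.length → (∀ a ∈ l1, ∀ b, f a b = b) →
    List.zipWith f l1 l2 = l2 := by
  intro l1
  induction l1 with
  | nil => intro l2 hl _; simp at hl; simp [hl]
  | cons x xs ih =>
    intro l2 hl h
    cases l2 with
    | nil => simp at hl
    | cons y ys =>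
      simp only [List.zipWith_cons_cons]
      rw [h x (List.mem_cons_self) y,
        ih ys (by simpa using hl) (fun a ha b => h a (List.mem_cons_of_mem _ ha) b)]

lemma pvZipWith_diag {α β : Type} (f : α → α → β) :
    ∀ (l : List α), List.zipWith f l l = l.map (fun a => f a a) := by
  intro l
  induction l with
  | nil => simp
  | cons x xs ih => simp [ih]

-- one unfolding of the column step, with zip/map turned into zipWith
lemma pvBStep_pos (alignment_strings : List String) (tc : List Int)
    (idx : Int) (rows : List (List String)) (j : Nat) (h : (j : Int) ∈ tc) :
    pvBStep alignment_strings (PySem.Set.ofList tc) (idx, rows) j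
      = (idx, List.zipWith (fun (s : String) acc =>
          if j < s.toList.length ∧ s.toList.getD j ' ' ≠ '-'
          then acc ++ ["I" ++ PySem.Int.toStr idx] else acc) alignment_strings rows) := by
  simp [pvBStep, PySem.Set.mem_ofList, h, List.zip_eq_zipWith, List.map_zipWith]

lemma pvBStep_neg (alignment_strings : List String) (tc : List Int)
    (idx : Int) (rows : List (List String)) (j : Nat) (h : ¬ (j : Int) ∈ tc) :
    pvBStep alignment_strings (PySem.Set.ofList tc) (idx, rows) j
      = (idx + 1, List.zipWith (fun (s : String) acc =>
          if j < s.toList.length then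
            acc ++ [if s.toList.getD j ' ' = '-'
                    then "D" ++ PySem.Int.toStr (idx + 1) else "M" ++ PySem.Int.toStr (idx + 1)]
          else acc) alignment_strings rows) := by
  simp [pvBStep, PySem.Set.mem_ofList, h, List.zip_eq_zipWith, List.map_zipWith]

-- the column-major fold: each row accumulator ends with its pvRowSpec suffix
set_option maxRecDepth 8000 in
lemma pvB_fold (alignment_strings : List String) (tc : List Int) :
    ∀ (n j0 : Nat) (idx : Int) (rows : List (List String)),
    rows.length = alignment_strings.length →
    (∀ s ∈ alignment_strings, s.toList.length ≤ j0 + n) →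
    ((List.range' j0 n).foldl (pvBStep alignment_strings (PySem.Set.ofList tc)) (idx, rows)).2
      = List.zipWith (fun (s : String) acc => acc ++ pvRowSpec tc (s.toList.drop j0) j0 idx)
          alignment_strings rows := by
  intro n
  induction n with
  | zero =>
    intro j0 idx rows hlen hmax
    simp only [List.range'_zero, List.foldl_nil]
    exact (pvZipWith_id _ _ _ hlen (fun s hs b => by
      have : s.toList.drop j0 = [] := List.drop_eq_nil_of_le (by simpa using hmax s hs)
      simp [this, pvRowSpec])).symm
  | succ n ih =>
    intro j0 idx rows hlen hmax
    rw [List.range'_succ, List.foldl_cons]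
    have hmax' : ∀ s ∈ alignment_strings, s.toList.length ≤ (j0 + 1) + n := by
      intro s hs; have := hmax s hs; omega
    by_cases htc : (j0 : Int) ∈ tc
    · rw [pvBStep_pos alignment_strings tc idx rows j0 htc]
      rw [ih (j0 + 1) idx _ (by simp [hlen]) hmax']
      rw [pvZipWith_comp]
      apply pvZipWith_congr
      intro s hs acc
      by_cases hj : j0 < s.toList.length
      · have hd : s.toList.drop j0 = s.toList[j0] :: s.toList.drop (j0 + 1) :=
          List.drop_eq_getElem_cons hj
        have hgetD : s.toList.getD j0 ' ' = s.toList[j0] := List.getD_eq_getElem _ _ hj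
        by_cases hc : s.toList[j0] = '-'
        · have hcond : ¬ (j0 < s.toList.length ∧ s.toList.getD j0 ' ' ≠ '-') := by
            rw [hgetD, hc]; simp
          rw [hd, if_neg hcond]
          simp only [pvRowSpec]
          rw [if_pos htc, if_pos hc]
          simp
        · have hcond : j0 < s.toList.length ∧ s.toList.getD j0 ' ' ≠ '-' :=
            ⟨hj, by rw [hgetD]; exact hc⟩
          rw [hd, if_pos hcond]
          simp only [pvRowSpec]
          rw [if_pos htc, if_neg hc]
          simp
      · have hd : s.toList.drop j0 = [] := List.drop_eq_nil_of_le (by omega)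
        have hd' : s.toList.drop (j0 + 1) = [] := List.drop_eq_nil_of_le (by omega)
        have hjs : ¬ j0 < s.length := by simpa using hj
        simp [hjs, hd, hd', pvRowSpec]
    · rw [pvBStep_neg alignment_strings tc idx rows j0 htc]
      rw [ih (j0 + 1) (idx + 1) _ (by simp [hlen]) hmax']
      rw [pvZipWith_comp]
      apply pvZipWith_congr
      intro s hs acc
      by_cases hj : j0 < s.toList.length
      · have hd : s.toList.drop j0 = s.toList[j0] :: s.toList.drop (j0 + 1) :=
          List.drop_eq_getElem_cons hj
        have hgetD : s.toList.getD j0 ' ' = s.toList[j0] := List.getD_eq_getElem _ _ hj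
        rw [hd, if_pos hj]
        simp only [pvRowSpec]
        rw [if_neg htc, hgetD]
        by_cases hc : s.toList[j0] = '-'
        · simp [hc]
        · simp [hc]
      · have hd : s.toList.drop j0 = [] := List.drop_eq_nil_of_le (by omega)
        have hd' : s.toList.drop (j0 + 1) = [] := List.drop_eq_nil_of_le (by omega)
        have hjs : ¬ j0 < s.length := by simpa using hj
        simp [hjs, hd, hd', pvRowSpec]

lemma pvB_map (alignment_strings : List String) (tc : List Int) :
    get_alignment_states_alt alignment_strings tc
      = alignment_strings.map (fun s => pvRowSpec tc s.toList 0 0) := by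
  show ((List.range (alignment_strings.foldl (fun m s => max m s.toList.length) 0)).foldl
      (pvBStep alignment_strings (PySem.Set.ofList tc))
      (0, alignment_strings.map (fun _ => ([] : List String)))).2 = _
  rw [List.range_eq_range']
  rw [pvB_fold alignment_strings tc _ 0 0 _ (by simp)
    (fun s hs => by simpa using pvMaxlen_le s alignment_strings 0 hs)]
  rw [List.zipWith_map_right, pvZipWith_diag]
  simp

theorem pv_main (alignment_strings : List String) (threshold_columns : List Int) :
    get_alignment_states alignment_strings threshold_columns
      = get_alignment_states_alt alignment_strings threshold_columns := by
  rw [pvA_map, pvB_map,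
    pvMap_getD alignment_strings (fun s => pvRowSpec threshold_columns s.toList 0 0)]
  apply List.map_congr_left
  intro i _
  exact pvARow_eq_spec _ _

-- ===== VERDICT (by name: the statement is the Claim_ definition above) =====
theorem get_alignment_states_spec : Claim_equal_get_alignment_states := by
  intro als tc _
  unfold Spec_get_alignment_states
  exact pv_main als tc
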